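-- pv_equiv track=rewrite | github.com/KevinKeul/aoc-2023-py | src/2023/advent17.py | next_steps
-- ===== SOURCE A (Python) =====
-- OPPOSITE = {'>': '<', 'v': '^', '<': '>', '^': 'v'}
--
-- def next_steps(way: str) -> str:
--     if len(way) == 0:
--         return '>v'
--     if len(way) < 3:
--         return '>v<^'.replace(OPPOSITE[way[-1]], '')
--     if len({x for x in way[-3:]}) == 1:
--         return '>v<^'.replace(OPPOSITE[way[-1]], '').replace(way[-1], '')
--     return '>v<^'.replace(OPPOSITE[way[-1]], '')
-- ===== SOURCE B (Python) =====
-- OPPOSITE = {'>': '<', 'v': '^', '<': '>', '^': 'v'}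
--
-- def next_steps(way: str) -> str:
--     if not way:
--         return '>v'
--     last = way[-1]
--     allowed = '>v<^'.replace(OPPOSITE[last], '')
--     run = 0
--     i = len(way) - 1
--     while i >= 0 and way[i] == last:
--         run += 1
--         i -= 1
--     if run >= 3:
--         allowed = allowed.replace(last, '')
--     return allowed
-- ===== Notes on version B (the rewrite author's own statement) =====
-- stated objective: alternative
-- what changed: Replaces A's fixed length-based branch chain and set-of-the-last-3-characters test with one computation of the allowed directions from OPPOSITE plus an explicit backward count of the trailing run of the last direction.
import Mathlib
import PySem

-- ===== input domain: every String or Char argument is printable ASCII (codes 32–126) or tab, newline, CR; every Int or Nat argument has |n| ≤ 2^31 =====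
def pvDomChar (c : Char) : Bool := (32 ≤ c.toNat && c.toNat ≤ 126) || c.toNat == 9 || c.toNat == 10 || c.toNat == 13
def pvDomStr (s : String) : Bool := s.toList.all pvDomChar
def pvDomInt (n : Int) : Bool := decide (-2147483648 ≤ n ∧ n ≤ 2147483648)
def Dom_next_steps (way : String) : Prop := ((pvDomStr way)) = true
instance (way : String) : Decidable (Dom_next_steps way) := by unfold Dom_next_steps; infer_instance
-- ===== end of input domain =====

-- B re-decomposes A: one computation of the allowed directions from OPPOSITE plus an explicit
-- backward trailing-run count, replacing A's length-based branch chain and set-of-last-3 test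
-- (objective: alternative decomposition, same cost).

-- ===== PORT A =====
def pvOpposite : PySem.Dict Char Char := ⟨[('>', '<'), ('v', '^'), ('<', '>'), ('^', 'v')]⟩

-- literal port of A over the code points (Python's KeyError on OPPOSITE[way[-1]] is the
-- `none` branch of the dict lookup; those inputs are excluded by Pre_)
def nextStepsAList (cs : List Char) : List Char :=
  if cs.length = 0 then ">v".toList
  else
    match PySem.List.pyGet? cs (-1) with
    | none => []
    | some last =>
      match PySem.Dict.get? pvOpposite last with
      | none => []  -- KeyError; outside Pre_
      | some opp =>
        if cs.length < 3 then PySem.Chars.replace ">v<^".toList [opp] []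
        else if (PySem.Set.ofList (PySem.List.slice cs (some (-3)) none)).length = 1 then
          PySem.Chars.replace (PySem.Chars.replace ">v<^".toList [opp] []) [last] []
        else PySem.Chars.replace ">v<^".toList [opp] []

def next_steps (way : String) : String := String.ofList (nextStepsAList way.toList)

-- ===== PORT B =====
-- literal port of B: B's backward index walk counting the trailing run of `last` is the
-- takeWhile prefix of the reversed code-point list
def nextStepsBList (cs : List Char) : List Char :=
  match cs.reverse with
  | [] => ">v".toList
  | last :: rest =>
    match PySem.Dict.get? pvOpposite last with
    | none => []  -- KeyError; outside Pre_
    | some opp =>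
      let allowed := PySem.Chars.replace ">v<^".toList [opp] []
      let run := 1 + (rest.takeWhile (fun c => c == last)).length
      if 3 ≤ run then PySem.Chars.replace allowed [last] [] else allowed

def next_steps_alt (way : String) : String := String.ofList (nextStepsBList way.toList)

-- ===== PRECONDITION & SPEC =====
-- Pre_ excludes exactly the inputs where A raises KeyError: a non-empty way whose last
-- character is not a key of OPPOSITE.
def Pre_next_steps (way : String) : Prop :=
  way.toList.getLast?.all (fun c => c ∈ ['>', 'v', '<', '^']) = true
instance (way : String) : Decidable (Pre_next_steps way) := by unfold Pre_next_steps; infer_instance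

def pvWitness_next_steps : String := ">>v"

def Spec_next_steps (way : String) (out : String) : Prop := out = next_steps_alt way
instance (way : String) (out : String) : Decidable (Spec_next_steps way out) := by unfold Spec_next_steps; infer_instance

-- ===== CLAIM (what is proved, stated in full; the proofs are below) =====
def Claim_equal_next_steps : Prop := ∀ (way : String), Dom_next_steps way → Pre_next_steps way → Spec_next_steps way (next_steps way)

-- ===== LEMMAS AND PROOFS =====

-- A's len(set(way[-3:])) == 1 names the same inputs as "the last three characters are all equal"
theorem setLen3 (c b a : Char) : ((PySem.Set.ofList [c, b, a]).length = 1) ↔ (b = a ∧ c = a) := by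
  by_cases hb : b = a <;> by_cases hc : c = a <;> by_cases hcb : c = b <;>
    simp_all [PySem.Set.ofList, PySem.Set.add] <;> split_ifs <;> simp_all

-- the two list-level programs agree on a list written back-to-front: length 1
theorem lists_agree_one (a : Char) :
    nextStepsAList ([a]) = nextStepsBList ([a]) := by
  simp only [nextStepsAList, nextStepsBList]
  cases h : PySem.Dict.get? pvOpposite a with
  | none => simp [PySem.List.pyGet?_neg_one, h]
  | some opp => simp [PySem.List.pyGet?_neg_one, h]

theorem lists_agree_two (b a : Char) :
    nextStepsAList ([b].reverse ++ [a]) = nextStepsBList ([b].reverse ++ [a]) := by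
  simp only [nextStepsAList, nextStepsBList]
  cases h : PySem.Dict.get? pvOpposite a with
  | none => simp [PySem.List.pyGet?_neg_one, h]
  | some opp =>
      by_cases hb : b = a
      · subst hb; simp [PySem.List.pyGet?_neg_one, h, List.takeWhile]
      · simp [PySem.List.pyGet?_neg_one, h, List.takeWhile]
        intro h3
        rw [beq_eq_false_iff_ne.mpr hb] at h3
        simp at h3
  
theorem lists_agree_big (b c a : Char) (rest' : List Char) :
    nextStepsAList ((b :: c :: rest').reverse ++ [a]) = nextStepsBList ((b :: c :: rest').reverse ++ [a]) := by
  have hcs : (b :: c :: rest').reverse ++ [a] = rest'.reverse ++ [c, b, a] := by simp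
  rw [hcs]
  have hlen : (rest'.reverse ++ [c, b, a]).length = rest'.length + 3 := by simp
  have hlast : (rest'.reverse ++ [c, b, a]).getLast? = some a := by simp
  have hslice : PySem.List.slice (rest'.reverse ++ [c, b, a]) (some (-3)) none = [c, b, a] := by
    rw [PySem.List.slice_from_neg_ofNat _ 3 (by omega), hlen]
    simpa using List.drop_left rest'.reverse [c, b, a]
  have hrev : (rest'.reverse ++ [c, b, a]).reverse = a :: b :: c :: rest' := by simp
  cases h : PySem.Dict.get? pvOpposite a with
  | none =>
      simp only [nextStepsAList, nextStepsBList, hlen, hrev, PySem.List.pyGet?_neg_one, hlast, h]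
      rw [if_neg (by omega : ¬ (rest'.length + 3 = 0))]
  | some opp =>
      simp only [nextStepsAList, nextStepsBList, hlen, hslice, hrev, PySem.List.pyGet?_neg_one,
        hlast, h]
      rw [if_neg (by omega : ¬ (rest'.length + 3 = 0)),
          if_neg (by omega : ¬ (rest'.length + 3 < 3))]
      by_cases hb : b = a <;> by_cases hc : c = a
      · rw [hb, hc]
        rw [if_pos ((setLen3 _ _ _).mpr ⟨rfl, rfl⟩),
            if_pos (show 3 ≤ 1 + ((a :: a :: rest').takeWhile (fun x => x == a)).length by
              simp [List.takeWhile]; omega)]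
      · rw [if_neg (fun hh => hc ((setLen3 _ _ _).mp hh).2),
            if_neg (show ¬ 3 ≤ 1 + ((b :: c :: rest').takeWhile (fun x => x == a)).length by
              simp [List.takeWhile, hb, show (c == a) = false from beq_eq_false_iff_ne.mpr hc])]
      · rw [if_neg (fun hh => hb ((setLen3 _ _ _).mp hh).1),
            if_neg (show ¬ 3 ≤ 1 + ((b :: c :: rest').takeWhile (fun x => x == a)).length by
              simp [List.takeWhile, show (b == a) = false from beq_eq_false_iff_ne.mpr hb])]
      · rw [if_neg (fun hh => hb ((setLen3 _ _ _).mp hh).1),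
            if_neg (show ¬ 3 ≤ 1 + ((b :: c :: rest').takeWhile (fun x => x == a)).length by
              simp [List.takeWhile, show (b == a) = false from beq_eq_false_iff_ne.mpr hb])]

theorem lists_agree_all (cs : List Char) : nextStepsAList cs = nextStepsBList cs := by
  cases h : cs.reverse with
  | nil => simp only [List.reverse_eq_nil_iff] at h; subst h; rfl
  | cons a rest =>
      have hc : cs = rest.reverse ++ [a] := by
        have := congrArg List.reverse h; simpa using this
      subst hc
      match rest with
      | [] => exact lists_agree_one a
      | [b] => exact lists_agree_two b a
      | b :: c :: rest' => exact lists_agree_big b c a rest'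

-- ===== VERDICT (by name: the statement is the Claim_ definition above) =====
theorem next_steps_spec : Claim_equal_next_steps := by
  intro way _ _
  show _ = _
  unfold next_steps next_steps_alt
  rw [lists_agree_all]
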